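-- pv_equiv track=rewrite | github.com/jloutey-hash/geovac | debug/br_a_breit_angular.py | rank_list_SS_tensor
-- ===== SOURCE A (Python) =====
-- from typing import Dict, FrozenSet, List, Set, Tuple
--
-- def rank_list_SS_tensor(l_max: int) -> List[Tuple[int, int]]:
--     """The rank-2 spin-spin tensor part of Breit-Pauli (the Y_2 term).
--
--     The orbital tensor attached to [sigma1 x sigma2]^2 is
--        Y_2(rhat_12) / r_12^3.
--     Multipole-expanding Y_2(rhat_12)/r_12^3 gives a bipolar sum
--        sum_{L1, L2} C_{L1 L2}^2 [Y_{L1}(rhat_1) (x) Y_{L2}(rhat_2)]^2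
--     with L1 + L2 >= 2 and triangle(L1, L2, 2). Parity requires L1 + L2 even.
--
--     Allowed lowest orders: (L1, L2) in {(0,2), (1,1), (2,0)}.
--
--     Higher multipoles (L1, L2) = (2,4), (4,2), (3,3), ... contribute to
--     higher-k expansions; but their *selection-rule pattern* is
--     additive with the low orders, and the ALLOWED set of quartets is the
--     union. We include all (L1, L2) with triangle(L1, L2, 2) and parity
--     (L1+L2) even, up to L = 2*l_max + 2 (sufficient to hit all pairs of
--     orbital labels with l <= l_max).
--     """
--     pairs: List[Tuple[int, int]] = []
--     Lmax = 2 * l_max + 2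
--     for L1 in range(Lmax + 1):
--         for L2 in range(Lmax + 1):
--             if abs(L1 - L2) > 2 or L1 + L2 < 2:
--                 continue
--             if (L1 + L2) % 2 != 0:
--                 continue
--             pairs.append((L1, L2))
--     return pairs
-- ===== SOURCE B (Python) =====
-- def rank_list_SS_tensor(l_max):
--     """Same pairs as A, but per L1 only the three possible partners
--     L2 in (L1-2, L1, L1+2) are tested: O(Lmax) instead of O(Lmax^2)."""
--     Lmax = 2 * l_max + 2
--     out = []
--     for L1 in range(Lmax + 1):
--         for L2 in (L1 - 2, L1, L1 + 2):
--             if 0 <= L2 <= Lmax and L1 + L2 >= 2: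
--                 out.append((L1, L2))
--     return out
-- ===== Notes on version B (the rewrite author's own statement) =====
-- stated objective: faster
-- what changed: Instead of scanning all (L1,L2) pairs in a nested loop, B enumerates for each L1 only the three candidates L2 in {L1-2, L1, L1+2} (the only values passing the triangle+parity test) and checks the bound and sum>=2.
import Mathlib
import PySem

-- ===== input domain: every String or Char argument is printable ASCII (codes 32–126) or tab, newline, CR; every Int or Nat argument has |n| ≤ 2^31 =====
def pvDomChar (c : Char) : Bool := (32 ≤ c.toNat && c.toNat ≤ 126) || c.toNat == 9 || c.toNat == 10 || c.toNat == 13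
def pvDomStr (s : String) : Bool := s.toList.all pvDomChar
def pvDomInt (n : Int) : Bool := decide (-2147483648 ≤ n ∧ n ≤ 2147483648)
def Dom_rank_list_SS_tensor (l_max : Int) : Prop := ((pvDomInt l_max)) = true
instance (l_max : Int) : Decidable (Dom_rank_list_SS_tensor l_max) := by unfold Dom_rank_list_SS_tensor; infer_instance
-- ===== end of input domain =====

-- B replaces A's quadratic double scan by emitting, for each L1, only the three
-- candidate partners L2 ∈ {L1-2, L1, L1+2}; proved to return exactly A's list.

-- ===== PORT A =====
-- literal transliteration of A: nested for-loops over range(Lmax+1) with two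
-- 'continue' guards, appending (L1, L2)
def rank_list_SS_tensor (l_max : Int) : List (Int × Int) :=
  let Lmax := 2 * l_max + 2
  (PySem.List.pyRange 0 (Lmax + 1) 1).foldl (fun pairs L1 =>
    (PySem.List.pyRange 0 (Lmax + 1) 1).foldl (fun pairs L2 =>
      if 2 < (L1 - L2).natAbs ∨ L1 + L2 < 2 then pairs
      else if (L1 + L2) % 2 ≠ 0 then pairs
      else pairs ++ [(L1, L2)]) pairs) []

-- ===== PORT B =====
-- transliteration of Source B: per L1, fold over the 3-tuple of candidates
def rank_list_SS_tensor_alt (l_max : Int) : List (Int × Int) :=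
  let Lmax := 2 * l_max + 2
  (PySem.List.pyRange 0 (Lmax + 1) 1).foldl (fun out L1 =>
    [L1 - 2, L1, L1 + 2].foldl (fun out L2 =>
      if 0 ≤ L2 ∧ L2 ≤ Lmax ∧ 2 ≤ L1 + L2 then out ++ [(L1, L2)] else out) out) []

-- ===== PRECONDITION & SPEC =====
def Spec_rank_list_SS_tensor (l_max : Int) (out : List (Int × Int)) : Prop := out = rank_list_SS_tensor_alt l_max
instance (l_max : Int) (out : List (Int × Int)) : Decidable (Spec_rank_list_SS_tensor l_max out) := by unfold Spec_rank_list_SS_tensor; infer_instance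

-- ===== CLAIM (what is proved, stated in full; the proofs are below) =====
def Claim_equal_rank_list_SS_tensor : Prop := ∀ (l_max : Int), Dom_rank_list_SS_tensor l_max → Spec_rank_list_SS_tensor l_max (rank_list_SS_tensor l_max)

-- ===== LEMMAS AND PROOFS =====

-- a fold that conditionally appends is init ++ (filter, then map)
theorem pv_foldl_if_append {α β : Type} (p : α → Prop) [DecidablePred p] (f : α → β) :
    ∀ (l : List α) (acc : List β),
      l.foldl (fun acc x => if p x then acc ++ [f x] else acc) acc
        = acc ++ (l.filter (fun x => decide (p x))).map f := by
  intro l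
  induction l with
  | nil => intro acc; simp
  | cons a t ih =>
      intro acc
      by_cases h : p a <;> simp [List.foldl_cons, ih, h]

-- the inner loops agree: filtering the whole range by A's guards equals
-- filtering the three candidates by B's guard (both strictly increasing, same members)
theorem pv_inner_eq (Lmax L1 : Int) :
    ((PySem.List.pyRange 0 (Lmax + 1) 1).filter
        (fun L2 => decide (¬(2 < (L1 - L2).natAbs ∨ L1 + L2 < 2) ∧ (L1 + L2) % 2 = 0)))
      = ([L1 - 2, L1, L1 + 2].filter
          (fun L2 => decide (0 ≤ L2 ∧ L2 ≤ Lmax ∧ 2 ≤ L1 + L2))) := by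
  have hL : ((PySem.List.pyRange 0 (Lmax + 1) 1).filter
      (fun L2 => decide (¬(2 < (L1 - L2).natAbs ∨ L1 + L2 < 2) ∧ (L1 + L2) % 2 = 0))).Pairwise (· < ·) :=
    (PySem.List.pairwise_lt_pyRange_one 0 (Lmax + 1)).filter _
  have hR : ([L1 - 2, L1, L1 + 2].filter
      (fun L2 => decide (0 ≤ L2 ∧ L2 ≤ Lmax ∧ 2 ≤ L1 + L2))).Pairwise ((· < ·) : Int → Int → Prop) := by
    refine List.Pairwise.filter _ ?_
    refine List.pairwise_cons.mpr ⟨?_, List.pairwise_cons.mpr ⟨?_, List.pairwise_singleton _ _⟩⟩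
    · intro b hb
      simp only [List.mem_cons, List.not_mem_nil, or_false] at hb
      rcases hb with rfl | rfl <;> omega
    · intro b hb
      simp only [List.mem_singleton] at hb
      subst hb; omega
  have hperm :
      ((PySem.List.pyRange 0 (Lmax + 1) 1).filter
        (fun L2 => decide (¬(2 < (L1 - L2).natAbs ∨ L1 + L2 < 2) ∧ (L1 + L2) % 2 = 0))).Perm
      ([L1 - 2, L1, L1 + 2].filter
        (fun L2 => decide (0 ≤ L2 ∧ L2 ≤ Lmax ∧ 2 ≤ L1 + L2))) := by
    rw [List.perm_ext_iff_of_nodup (hL.nodup) (hR.nodup)]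
    intro x
    simp only [List.mem_filter, PySem.List.mem_pyRange_one, decide_eq_true_eq,
      List.mem_cons, List.not_mem_nil, or_false]
    omega
  exact hperm.eq_of_pairwise (fun a b _ _ hab hba => absurd hba (not_lt.mpr hab.le)) hL hR

-- ===== VERDICT (by name: the statement is the Claim_ definition above) =====
theorem rank_list_SS_tensor_spec : Claim_equal_rank_list_SS_tensor := by
  intro l_max _
  unfold Spec_rank_list_SS_tensor rank_list_SS_tensor rank_list_SS_tensor_alt
  apply PySem.List.foldl_congr_mem
  intro acc L1 _
  have hA :
      (fun (pairs : List (Int × Int)) L2 =>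
        if 2 < (L1 - L2).natAbs ∨ L1 + L2 < 2 then pairs
        else if (L1 + L2) % 2 ≠ 0 then pairs
        else pairs ++ [(L1, L2)])
      = (fun pairs L2 =>
        if ¬(2 < (L1 - L2).natAbs ∨ L1 + L2 < 2) ∧ (L1 + L2) % 2 = 0
        then pairs ++ [(L1, L2)] else pairs) := by
    funext pairs L2
    split_ifs <;> simp_all
  rw [hA,
    pv_foldl_if_append (fun L2 => ¬(2 < (L1 - L2).natAbs ∨ L1 + L2 < 2) ∧ (L1 + L2) % 2 = 0)
      (fun L2 => (L1, L2)),
    pv_foldl_if_append (fun L2 => 0 ≤ L2 ∧ L2 ≤ (2 * l_max + 2) ∧ 2 ≤ L1 + L2)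
      (fun L2 => (L1, L2)),
    pv_inner_eq (2 * l_max + 2) L1]
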